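-- pv_equiv track=rewrite | github.com/michelepfister/crispr-spacer-analysis | parser.py | group_similar_sequences
-- ===== SOURCE A (Python) =====
-- from typing import List, Dict, Set, Union, Tuple, Any
--
-- def hamming_distance(seq1: str, seq2: str) -> Union[int, float]:
--     """
--     Calculate the Hamming distance (number of differing positions) between two sequences.
--
--     Args:
--         seq1 (str): First sequence
--         seq2 (str): Second sequence
--
--     Returns:
--         Union[int, float]: Number of positions where sequences differ, or float('inf') if lengths differ
--     """
--     if len(seq1) != len(seq2):
--         return float('inf')  # Can't compare sequences of different lengths
--
--     return sum(c1 != c2 for c1, c2 in zip(seq1, seq2))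
--
-- def group_similar_sequences(sequences: List[str], max_distance: int = 2) -> List[List[str]]:
--     """
--     Group sequences that have less than max_distance+1 differences between them.
--
--     Args:
--         sequences (List[str]): List of sequences to group
--         max_distance (int): Maximum allowed differences (default: 2, meaning <3 differences)
--
--     Returns:
--         List[List[str]]: List of groups, where each group is a list of similar sequences
--     """
--     if not sequences:
--         return []
--
--     groups: List[List[str]] = []
--     used: Set[str] = set()
--
--     for i, seq1 in enumerate(sequences):
--         if seq1 in used:
--             continue
--
--         # Start a new group with this sequence
--         current_group: List[str] = [seq1]
--         used.add(seq1)
--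
--         # Find all sequences similar to this one
--         for j, seq2 in enumerate(sequences):
--             if i != j and seq2 not in used:
--                 distance = hamming_distance(seq1, seq2)
--                 if isinstance(distance, int) and distance <= max_distance:
--                     current_group.append(seq2)
--                     used.add(seq2)
--
--         groups.append(current_group)
--
--     return groups
-- ===== SOURCE B (Python) =====
-- def group_similar_sequences(sequences, max_distance=2):
--     """Online single pass: each distinct sequence is attached to the FIRST existing
--     group whose seed (first member) is within the Hamming threshold, or opens a new
--     group at the end. Element-major instead of A's seed-major double scan."""
--     def near(seed, s):
--         return len(s) == len(seed) and sum(x != y for x, y in zip(seed, s)) <= max_distance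
--     groups = []
--     for s in dict.fromkeys(sequences):
--         for g in groups:
--             if near(g[0], s):
--                 g.append(s)
--                 break
--         else:
--             groups.append([s])
--     return groups
-- ===== Notes on version B (the rewrite author's own statement) =====
-- stated objective: alternative
-- what changed: A is seed-major: each fresh seed rescans the whole input grabbing every still-unused sequence within the threshold (shared 'used' set, indexed double loop); B is element-major: one online pass over the distinct sequences that attaches each to the first already-open group whose seed is near, or opens a new group - equivalence rests on an exchange argument, not on the same scans.
import Mathlib
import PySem

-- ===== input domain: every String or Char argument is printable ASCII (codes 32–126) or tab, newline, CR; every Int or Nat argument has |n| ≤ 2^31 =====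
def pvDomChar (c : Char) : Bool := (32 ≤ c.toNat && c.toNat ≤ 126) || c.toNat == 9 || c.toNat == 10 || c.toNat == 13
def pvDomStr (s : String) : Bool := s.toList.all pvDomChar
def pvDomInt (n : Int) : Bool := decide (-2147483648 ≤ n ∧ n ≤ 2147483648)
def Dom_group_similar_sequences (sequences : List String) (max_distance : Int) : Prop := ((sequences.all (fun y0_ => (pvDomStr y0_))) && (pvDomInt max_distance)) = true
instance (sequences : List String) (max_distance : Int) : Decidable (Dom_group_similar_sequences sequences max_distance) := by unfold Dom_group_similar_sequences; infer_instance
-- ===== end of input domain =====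

-- B replaces A's seed-major double scan (each seed rescans the whole input with a shared 'used'
-- set) by an element-major online pass: each distinct sequence joins the first open group whose
-- seed is within the threshold, or opens a new group (objective: alternative).


-- ===== PORT A =====
-- float('inf') (lengths differ) is modelled as none; A only tests 'isinstance(distance, int)' on that value.
def hamming_distance (seq1 seq2 : String) : Option Int :=
  if seq1.toList.length ≠ seq2.toList.length then none
  else some (((seq1.toList.zip seq2.toList).map (fun p => if p.1 ≠ p.2 then (1 : Int) else 0)).sum)

-- inner loop body: 'for j, seq2 in enumerate(sequences): if i != j and seq2 not in used: …'
def innerStepA (max_distance : Int) (i : Int) (seq1 : String)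
    (st : List String × PySem.Set String) (q : Int × String) : List String × PySem.Set String :=
  if i != q.1 && !(PySem.Set.contains st.2 q.2) then
    match hamming_distance seq1 q.2 with
    | some dist => if dist ≤ max_distance then (st.1 ++ [q.2], PySem.Set.add st.2 q.2) else st
    | none => st
  else st

-- outer loop body: 'for i, seq1 in enumerate(sequences): if seq1 in used: continue …'
def outerStepA (max_distance : Int) (E : List (Int × String))
    (st : List (List String) × PySem.Set String) (p : Int × String) :
    List (List String) × PySem.Set String :=
  if PySem.Set.contains st.2 p.2 then st
  else
    let inner := E.foldl (innerStepA max_distance p.1 p.2) ([p.2], PySem.Set.add st.2 p.2)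
    (st.1 ++ [inner.1], inner.2)

def group_similar_sequences (sequences : List String) (max_distance : Int) : List (List String) :=
  if sequences = [] then []
  else
    ((PySem.List.enumerate sequences).foldl
      (outerStepA max_distance (PySem.List.enumerate sequences))
      ([], PySem.Set.empty)).1

-- ===== PORT B =====
-- 'near(seed, s)' of Source B
def near (max_distance : Int) (seed s : String) : Bool :=
  s.toList.length == seed.toList.length &&
  decide (((seed.toList.zip s.toList).map (fun p => if p.1 ≠ p.2 then (1 : Int) else 0)).sum ≤ max_distance)

-- inner 'for g in groups: … break / else: groups.append([s])' of Source B
def addTo (max_distance : Int) (s : String) : List (List String) → List (List String)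
  | [] => [[s]]
  | g :: gs => if near max_distance (g.headD "") s then (g ++ [s]) :: gs
               else g :: addTo max_distance s gs

-- 'for s in dict.fromkeys(sequences): …' of Source B
def group_similar_sequences_alt (sequences : List String) (max_distance : Int) : List (List String) :=
  (PySem.List.dedup sequences).foldl (fun gs s => addTo max_distance s gs) []

-- ===== PRECONDITION & SPEC =====
def Spec_group_similar_sequences (sequences : List String) (max_distance : Int) (out : List (List String)) : Prop := out = group_similar_sequences_alt sequences max_distance
instance (sequences : List String) (max_distance : Int) (out : List (List String)) : Decidable (Spec_group_similar_sequences sequences max_distance out) := by unfold Spec_group_similar_sequences; infer_instance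

-- ===== CLAIM (what is proved, stated in full; the proofs are below) =====
def Claim_equal_group_similar_sequences : Prop := ∀ (sequences : List String) (max_distance : Int), Dom_group_similar_sequences sequences max_distance → Spec_group_similar_sequences sequences max_distance (group_similar_sequences sequences max_distance)

-- ===== LEMMAS AND PROOFS =====

-- proof-only middle form: seed-major head-partition recursion on the deduped input;
-- A is shown equal to it (outer_char), and it is shown equal to B's online fold (altLoop_eq_fold).
def altLoop (max_distance : Int) : List String → List (List String)
  | [] => []
  | seed :: rest =>
    (seed :: rest.filter (near max_distance seed)) ::
      altLoop max_distance (rest.filter (fun s => !near max_distance seed s))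
termination_by l => l.length
decreasing_by simpa using List.length_filter_le _ rest.attach

-- the distinct elements of l not in U, in first-occurrence order (the "fresh" elements as A's scans see them)
def dnew (U : List String) : List String → List String
  | [] => []
  | x :: l => if x ∈ U then dnew U l else x :: dnew (U ++ [x]) l

theorem dnew_congU {U U' : List String} (l : List String)
    (h : ∀ x, x ∈ U ↔ x ∈ U') : dnew U l = dnew U' l := by
  induction l generalizing U U' with
  | nil => rfl
  | cons y l ih =>
    by_cases hy : y ∈ U
    · simp only [dnew, if_pos hy, if_pos ((h y).mp hy)]
      exact ih h
    · have hy' : y ∉ U' := fun c => hy ((h y).mpr c)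
      simp only [dnew, if_neg hy, if_neg hy']
      refine congrArg _ (ih ?_)
      intro x
      simp only [List.mem_append, h x]

theorem dnew_add (t : String) (l : List String) : ∀ U : List String,
    dnew (U ++ [t]) l = (dnew U l).filter (fun x => decide (x ≠ t)) := by
  induction l with
  | nil => intro U; rfl
  | cons x l ih =>
    intro U
    by_cases hxU : x ∈ U
    · simp [dnew, hxU, List.mem_append, ih U]
    · by_cases hxt : x = t
      · subst hxt
        have hco : dnew (U ++ [x] ++ [x]) l = dnew (U ++ [x]) l :=
          dnew_congU l (by intro y; simp only [List.mem_append, List.mem_singleton]; tauto)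
        have hx' : x ∈ U ++ [x] := by simp
        simp only [dnew, if_pos hx', if_neg hxU, List.filter_cons]
        simp only [ih U]
        rw [List.filter_filter]
        simp
      · have hx' : x ∉ U ++ [t] := by simp [hxU, hxt]
        have hswap : dnew (U ++ [t] ++ [x]) l = dnew (U ++ [x] ++ [t]) l :=
          dnew_congU l (by intro y; simp only [List.mem_append, List.mem_singleton]; tauto)
        simp only [dnew, if_neg hxU, if_neg hx', hswap, ih (U ++ [x]), List.filter_cons]
        simp [hxt]

theorem dnew_addList (X : List String) (l : List String) : ∀ U : List String,
    dnew (U ++ X) l = (dnew U l).filter (fun x => decide (x ∉ X)) := by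
  induction X with
  | nil => intro U; simp
  | cons t X ih =>
    intro U
    have h1 : U ++ t :: X = (U ++ [t]) ++ X := by simp
    rw [h1, ih (U ++ [t]), dnew_add, List.filter_filter]
    apply List.filter_congr
    intro x _
    by_cases hxt : x = t <;> simp [hxt]

theorem dnew_append_left {U : List String} {p : List String} (l : List String)
    (hp : ∀ x ∈ p, x ∈ U) : dnew U (p ++ l) = dnew U l := by
  induction p with
  | nil => rfl
  | cons y p ih =>
    have hy : y ∈ U := hp y (by simp)
    simp only [List.cons_append, dnew, if_pos hy]
    exact ih (fun x hx => hp x (by simp [hx]))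

theorem dnew_append (l2 : List String) : ∀ (l1 U : List String),
    dnew U (l1 ++ l2) = dnew U l1 ++ dnew (U ++ dnew U l1) l2 := by
  intro l1
  induction l1 with
  | nil => intro U; simp [dnew]
  | cons x l1 ih =>
    intro U
    by_cases hx : x ∈ U
    · simp [dnew, hx, ih U]
    · simp only [List.cons_append, dnew, if_neg hx, ih (U ++ [x]), List.append_assoc,
        List.nil_append]

theorem dnew_nil_eq_dedup (l : List String) : dnew [] l = PySem.List.dedup l := by
  induction l using List.reverseRecOn with
  | nil => rfl
  | append_singleton xs x ih =>
    rw [dnew_append [x] xs]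
    simp only [List.nil_append, ih, PySem.List.dedup_eq_ofList, PySem.Set.ofList_append_singleton,
      PySem.Set.add_eq_ite]
    by_cases hx : x ∈ PySem.Set.ofList xs
    · simp [dnew, hx]
    · simp [dnew, hx]

-- behaviour of hamming_distance, phrased through Source B's near
theorem ham_none {d : Int} {seed t : String} (h : hamming_distance seed t = none) :
    near d seed t = false := by
  unfold hamming_distance at h
  unfold near
  split_ifs at h with hl
  have hne : (t.toList.length == seed.toList.length) = false :=
    beq_eq_false_iff_ne.mpr (fun c => hl c.symm)
  rw [hne, Bool.false_and]

theorem ham_some {d dist : Int} {seed t : String}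
    (h : hamming_distance seed t = some dist) :
    near d seed t = decide (dist ≤ d) := by
  unfold hamming_distance at h
  unfold near
  split_ifs at h with hl
  have hl' : (t.toList.length == seed.toList.length) = true :=
    beq_iff_eq.mpr (by omega)
  have hd : dist = ((seed.toList.zip t.toList).map (fun p => if p.1 ≠ p.2 then (1 : Int) else 0)).sum := by
    injection h with h'; omega
  rw [hl', Bool.true_and, hd]

-- the inner scan with the index test removed (justified by innerA_eq_noidx)
def innerN (d : Int) (seed : String) (st : List String × List String) (t : String) :
    List String × List String :=
  if t ∈ st.2 then st
  else if near d seed t then (st.1 ++ [t], st.2 ++ [t]) else st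

theorem innerA_eq_noidx (d : Int) (i : Int) (seed : String) :
    ∀ (E : List (Int × String)) (g u : List String),
      (∀ q ∈ E, q.1 = i → q.2 = seed) → seed ∈ u →
      E.foldl (innerStepA d i seed) (g, u) = (E.map Prod.snd).foldl (innerN d seed) (g, u) := by
  intro E
  induction E with
  | nil => intro g u _ _; rfl
  | cons q E ih =>
    intro g u hq hseed
    simp only [List.foldl_cons, List.map_cons]
    by_cases hji : q.1 = i
    · have ht : q.2 = seed := hq q (by simp) hji
      have hm : q.2 ∈ u := ht ▸ hseed
      have h1 : innerStepA d i seed (g, u) q = (g, u) := by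
        simp [innerStepA, hji, hm]
      have h2 : innerN d seed (g, u) q.2 = (g, u) := by simp [innerN, hm]
      rw [h1, h2]
      exact ih g u (fun r hr => hq r (by simp [hr])) hseed
    · by_cases hmem : q.2 ∈ u
      · have h1 : innerStepA d i seed (g, u) q = (g, u) := by
          simp [innerStepA, hmem]
        have h2 : innerN d seed (g, u) q.2 = (g, u) := by simp [innerN, hmem]
        rw [h1, h2]
        exact ih g u (fun r hr => hq r (by simp [hr])) hseed
      · have hc : (i != q.1 && !PySem.Set.contains u q.2) = true := by
          simp [hmem, bne_iff_ne, Ne.symm hji]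
        have hA : innerStepA d i seed (g, u) q =
            if near d seed q.2 then (g ++ [q.2], u ++ [q.2]) else (g, u) := by
          simp only [innerStepA, hc, if_pos]
          cases hh : hamming_distance seed q.2 with
          | none => simp [ham_none (d := d) hh]
          | some dist =>
            rw [ham_some (d := d) hh]
            by_cases hle : dist ≤ d
            · simp [hle, PySem.Set.add_of_not_mem hmem]
            · simp [hle]
        have hN : innerN d seed (g, u) q.2 =
            if near d seed q.2 then (g ++ [q.2], u ++ [q.2]) else (g, u) := by
          simp [innerN, hmem]
        rw [hA, hN]
        by_cases hn : near d seed q.2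
        · simp only [if_pos hn]
          exact ih _ _ (fun r hr => hq r (by simp [hr])) (by simp [hseed])
        · simp only [if_neg hn]
          exact ih g u (fun r hr => hq r (by simp [hr])) hseed

theorem filter_filter_ne {P : String → Bool} {t : String} (hP : P t = false)
    (xs : List String) : (xs.filter (fun x => decide (x ≠ t))).filter P = xs.filter P := by
  induction xs with
  | nil => rfl
  | cons x xs ih =>
    rw [List.filter_cons]
    by_cases hxt : x = t
    · subst hxt
      have h1 : (decide (x ≠ x)) = false := by simp
      rw [h1]
      simp only [Bool.false_eq_true, if_false, ih, List.filter_cons, hP]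
    · have h1 : (decide (x ≠ t)) = true := by simp [hxt]
      rw [h1, if_pos rfl, List.filter_cons, List.filter_cons]
      by_cases hPx : P x
      · rw [if_pos hPx, if_pos hPx, ih]
      · rw [if_neg hPx, if_neg hPx, ih]

theorem innerN_char (d : Int) (seed : String) :
    ∀ (l g u : List String),
      l.foldl (innerN d seed) (g, u) =
        (g ++ (dnew u l).filter (near d seed), u ++ (dnew u l).filter (near d seed)) := by
  intro l
  induction l with
  | nil => intro g u; simp [dnew]
  | cons t l ih =>
    intro g u
    by_cases hm : t ∈ u
    · have h1 : innerN d seed (g, u) t = (g, u) := by simp [innerN, hm]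
      simp only [List.foldl_cons, h1, dnew, if_pos hm, ih]
    · by_cases hn : near d seed t
      · have h1 : innerN d seed (g, u) t = (g ++ [t], u ++ [t]) := by simp [innerN, hm, hn]
        simp only [List.foldl_cons, h1, dnew, if_neg hm, ih, List.filter_cons, hn]
        simp
      · have h1 : innerN d seed (g, u) t = (g, u) := by simp [innerN, hm, hn]
        have hfilt : (dnew u (t :: l)).filter (near d seed) =
            (dnew u l).filter (near d seed) := by
          simp only [dnew, if_neg hm, List.filter_cons, hn, Bool.false_eq_true, if_false]
          rw [dnew_add t l u, filter_filter_ne (by simpa using hn)]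
        simp only [List.foldl_cons, h1, ih, hfilt]

theorem outer_char (d : Int) (seqs : List String) :
    ∀ (E2 E1 : List (Int × String)) (g : List (List String)) (u : List String),
      PySem.List.enumerate seqs = E1 ++ E2 → (∀ q ∈ E1, q.2 ∈ u) →
      (E2.foldl (outerStepA d (PySem.List.enumerate seqs)) (g, u)).1 =
        g ++ altLoop d (dnew u (E2.map Prod.snd)) := by
  intro E2
  induction E2 with
  | nil => intro E1 g u _ _; simp [altLoop, dnew]
  | cons p E2 ih =>
    intro E1 g u hE hE1
    obtain ⟨i, seed⟩ := p
    by_cases hm : seed ∈ u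
    · have hstep : outerStepA d (PySem.List.enumerate seqs) (g, u) (i, seed) = (g, u) := by
        simp [outerStepA, hm]
      simp only [List.foldl_cons, hstep]
      rw [ih (E1 ++ [(i, seed)]) g u (by simp [hE]) (by
        intro q hq
        rcases List.mem_append.mp hq with h | h
        · exact hE1 q h
        · simp at h; subst h; exact hm)]
      simp [dnew, hm]
    · -- seed starts a new group
      have hseq : seqs = E1.map Prod.snd ++ seed :: E2.map Prod.snd := by
        have h := PySem.List.map_snd_enumerate (xs := seqs) (s := 0)
        rw [hE] at h
        simpa using h.symm
      have hidx : ∀ q ∈ PySem.List.enumerate seqs, q.1 = i → q.2 = seed := by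
        have hmem : ((i : Int), seed) ∈ PySem.List.enumerate seqs := by rw [hE]; simp
        rcases (PySem.List.mem_enumerate_iff _ _ _).mp hmem with ⟨k, hk, hpk⟩
        have hi : i = (k : Int) := by
          have := congrArg Prod.fst hpk; simpa using this
        have hsd : seed = seqs[k] := by
          have := congrArg Prod.snd hpk; simpa using this
        intro q hq hq1
        rcases (PySem.List.mem_enumerate_iff _ _ _).mp hq with ⟨k', hk', hpk'⟩
        have h1 : q.1 = (k' : Int) := by
          have := congrArg Prod.fst hpk'; simpa using this
        have hkk : k' = k := by
          have : (k' : Int) = (k : Int) := by rw [← h1, hq1, hi]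
          exact_mod_cast this
        subst hkk
        have h2 : q.2 = seqs[k'] := by
          have := congrArg Prod.snd hpk'; simpa using this
        rw [h2, ← hsd]
      have hcont : PySem.Set.contains u seed = false := by
        cases hc : PySem.Set.contains u seed
        · rfl
        · exact absurd ((PySem.Set.contains_iff _ _).mp hc) hm
      have hpre : ∀ x ∈ E1.map Prod.snd, x ∈ u ++ [seed] := by
        intro x hx
        rcases List.mem_map.mp hx with ⟨q, hq, hqx⟩
        exact List.mem_append.mpr (Or.inl (hqx ▸ hE1 q hq))
      have hred : dnew (u ++ [seed]) seqs = dnew (u ++ [seed]) (E2.map Prod.snd) := by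
        rw [hseq, dnew_append_left _ hpre]
        simp [dnew]
      have hinner :
          (PySem.List.enumerate seqs).foldl (innerStepA d i seed) ([seed], PySem.Set.add u seed) =
            ([seed] ++ (dnew (u ++ [seed]) (E2.map Prod.snd)).filter (near d seed),
             (u ++ [seed]) ++ (dnew (u ++ [seed]) (E2.map Prod.snd)).filter (near d seed)) := by
        rw [PySem.Set.add_of_not_mem hm,
          innerA_eq_noidx d i seed _ [seed] (u ++ [seed]) hidx (by simp),
          PySem.List.map_snd_enumerate, innerN_char, hred]
      have hstep : outerStepA d (PySem.List.enumerate seqs) (g, u) (i, seed) =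
          (g ++ [[seed] ++ (dnew (u ++ [seed]) (E2.map Prod.snd)).filter (near d seed)],
           (u ++ [seed]) ++ (dnew (u ++ [seed]) (E2.map Prod.snd)).filter (near d seed)) := by
        simp only [outerStepA, hcont, Bool.false_eq_true, if_false, hinner]
      set r : List String := dnew (u ++ [seed]) (E2.map Prod.snd) with hr
      set C : List String := r.filter (near d seed) with hC
      have hnext : dnew ((u ++ [seed]) ++ C) (E2.map Prod.snd) =
          r.filter (fun s => !near d seed s) := by
        rw [dnew_addList C (E2.map Prod.snd) (u ++ [seed]), ← hr]
        apply List.filter_congr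
        intro x hx
        by_cases hn : near d seed x
        · have : x ∈ C := by rw [hC]; exact List.mem_filter.mpr ⟨hx, hn⟩
          simp [this, hn]
        · have : x ∉ C := by
            rw [hC]; intro hcx; exact hn (List.mem_filter.mp hcx).2
          simp [this, hn]
      simp only [List.foldl_cons, hstep]
      rw [ih (E1 ++ [(i, seed)]) _ _ (by simp [hE]) (by
        intro q hq
        rcases List.mem_append.mp hq with h | h
        · exact List.mem_append.mpr (Or.inl (List.mem_append.mpr (Or.inl (hE1 q h))))
        · simp at h; subst h; simp)]
      rw [hnext]
      have hcons : dnew u (seed :: E2.map Prod.snd) = seed :: r := by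
        simp only [dnew, if_neg hm, hr]
      simp only [List.map_cons, hcons]
      rw [altLoop]
      simp [hC]

-- EXCHANGE: the online fold with a leading open group (seed :: m) :: gs sends exactly the
-- near-seed elements into that group and lets the rest run through gs.
theorem fold_addTo_cons (d : Int) (seed : String) :
    ∀ (l : List String) (m : List String) (gs : List (List String)),
      l.foldl (fun st s => addTo d s st) ((seed :: m) :: gs) =
        (seed :: (m ++ l.filter (near d seed))) ::
          (l.filter (fun s => !near d seed s)).foldl (fun st s => addTo d s st) gs := by
  intro l
  induction l with
  | nil => intro m gs; simp
  | cons x l ih =>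
    intro m gs
    by_cases hn : near d seed x
    · have hstep : addTo d x ((seed :: m) :: gs) = (seed :: (m ++ [x])) :: gs := by
        simp [addTo, hn]
      simp only [List.foldl_cons, hstep, ih (m ++ [x]) gs, List.filter_cons, hn]
      simp
    · have hstep : addTo d x ((seed :: m) :: gs) = (seed :: m) :: addTo d x gs := by
        simp [addTo, hn]
      simp only [List.foldl_cons, hstep, ih m (addTo d x gs), List.filter_cons, hn]
      simp

-- the proof-only seed-major recursion equals B's online fold
theorem altLoop_eq_fold_aux (d : Int) : ∀ (n : Nat) (l : List String), l.length ≤ n →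
    altLoop d l = l.foldl (fun st s => addTo d s st) [] := by
  intro n
  induction n with
  | zero =>
    intro l hl
    have : l = [] := List.eq_nil_of_length_eq_zero (Nat.le_zero.mp hl)
    subst this; rw [altLoop]; rfl
  | succ n ih =>
    intro l hl
    cases l with
    | nil => rw [altLoop]; rfl
    | cons seed rest =>
      rw [altLoop, List.foldl_cons]
      have hstep : addTo d seed [] = [[seed]] := rfl
      rw [hstep, fold_addTo_cons d seed rest [] [],
        ← ih (rest.filter (fun s => !near d seed s))
          (le_trans (List.length_filter_le _ rest) (by simpa using hl))]
      simp

theorem altLoop_eq_fold (d : Int) (l : List String) :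
    altLoop d l = l.foldl (fun st s => addTo d s st) [] :=
  altLoop_eq_fold_aux d l.length l le_rfl

-- ===== VERDICT (by name: the statement is the Claim_ definition above) =====
theorem group_similar_sequences_spec : Claim_equal_group_similar_sequences := by
  intro seqs d _
  unfold Spec_group_similar_sequences group_similar_sequences group_similar_sequences_alt
  by_cases h : seqs = []
  · subst h; simp [PySem.List.dedup]
  · rw [if_neg h, show (PySem.Set.empty : PySem.Set String) = [] from rfl,
      outer_char d seqs (PySem.List.enumerate seqs) [] [] [] (by simp) (by simp),
      PySem.List.map_snd_enumerate, dnew_nil_eq_dedup, altLoop_eq_fold]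
    rfl
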